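-- pv_equiv track=rewrite | github.com/ZappD0S/cfd | src/boundary_tools.py | get_dim_sign
-- ===== SOURCE A (Python) =====
-- clockwise_ds = [(0, -1), (1, 1), (0, 1), (1, -1)]
--
-- def get_dim_sign(P, center, cell_bounds):
--     ds_set = []
--     for dim in range(2):
--         for sign, shift in zip((-1, 1), cell_bounds[dim]):
--             if P[dim] == center[dim]+shift:
--                 ds_set.append((dim, sign))
--
--     if len(ds_set) > 1:
--         for ds in clockwise_ds:
--             if ds in ds_set:
--                 return ds
--     elif len(ds_set) == 1:
--         return ds_set[0]
--     else:
--         raise ValueError('error!')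
-- ===== SOURCE B (Python) =====
-- clockwise_ds = [(0, -1), (1, 1), (0, 1), (1, -1)]
--
-- def get_dim_sign(P, center, cell_bounds):
--     for dim, sign in clockwise_ds:
--         idx = 0 if sign == -1 else 1
--         if P[dim] == center[dim] + cell_bounds[dim][idx]:
--             return (dim, sign)
--     raise ValueError('error!')
-- ===== Notes on version B (the rewrite author's own statement) =====
-- stated objective: simpler
-- what changed: Replaces A's build-a-match-list-then-rescan (nested dim/zip loops filling ds_set, then length-based branching and a clockwise rescan) with a single loop over clockwise_ds that returns the first (dim, sign) whose bound matches.
-- outside the precondition, e.g. on get_dim_sign((5, 0), (0, 0), [[1], [0, 2]]): A returns (1, -1), B raises IndexError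
import Mathlib
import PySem

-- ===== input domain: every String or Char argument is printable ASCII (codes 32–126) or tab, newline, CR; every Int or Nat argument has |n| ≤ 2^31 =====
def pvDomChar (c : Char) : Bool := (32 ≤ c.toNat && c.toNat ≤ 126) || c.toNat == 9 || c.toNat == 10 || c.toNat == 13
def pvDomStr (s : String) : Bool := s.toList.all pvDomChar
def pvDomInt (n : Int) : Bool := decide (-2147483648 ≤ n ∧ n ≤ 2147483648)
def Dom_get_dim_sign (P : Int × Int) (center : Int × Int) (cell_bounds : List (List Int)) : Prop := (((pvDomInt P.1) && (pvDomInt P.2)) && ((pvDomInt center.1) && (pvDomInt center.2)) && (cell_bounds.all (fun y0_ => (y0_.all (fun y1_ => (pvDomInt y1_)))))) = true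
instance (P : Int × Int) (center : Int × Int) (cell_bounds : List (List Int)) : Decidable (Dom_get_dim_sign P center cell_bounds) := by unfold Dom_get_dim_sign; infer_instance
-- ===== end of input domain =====

-- B replaces A's build-then-rescan of matching (dim, sign) pairs with a single
-- clockwise-ordered loop returning the first matching bound (simpler).


-- ===== PORT A =====
-- clockwise_ds = [(0, -1), (1, 1), (0, 1), (1, -1)]
def clockwise_ds : List (Int × Int) := [(0, -1), (1, 1), (0, 1), (1, -1)]

-- P[dim] for a pair and dim ∈ {0, 1} (Python tuple indexing on the two dims used)
def pairGet (p : Int × Int) (dim : Int) : Int := if dim = 0 then p.1 else p.2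

def get_dim_sign (P : Int × Int) (center : Int × Int) (cell_bounds : List (List Int)) : Int × Int :=
  -- ds_set accumulation: for dim in range(2): for sign, shift in zip((-1,1), cell_bounds[dim]): …
  let ds_set : List (Int × Int) :=
    (PySem.List.pyRange 0 2 1).foldl (fun acc dim =>
      (List.zip [(-1 : Int), 1] ((PySem.List.pyGet? cell_bounds dim).getD [])).foldl
        (fun acc2 ss =>
          if pairGet P dim = pairGet center dim + ss.2 then acc2 ++ [(dim, ss.1)] else acc2)
        acc) []
  if ds_set.length > 1 then
    -- for ds in clockwise_ds: if ds in ds_set: return ds  (fallthrough unreachable here)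
    (clockwise_ds.find? (fun ds => ds_set.contains ds)).getD (0, 0)
  else if ds_set.length = 1 then
    (PySem.List.pyGet? ds_set 0).getD (0, 0)
  else
    (0, 0)  -- raise ValueError('error!') : excluded by Pre_get_dim_sign

-- ===== PORT B =====
-- for dim, sign in clockwise_ds: idx = 0 if sign == -1 else 1; if match: return (dim, sign)
def alt_loop (P : Int × Int) (center : Int × Int) (cell_bounds : List (List Int)) :
    List (Int × Int) → Int × Int
  | [] => (0, 0)  -- raise ValueError('error!') : excluded by Pre_get_dim_sign
  | (dim, sign) :: rest =>
    let idx : Int := if sign = -1 then 0 else 1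
    if pairGet P dim = pairGet center dim
        + (PySem.List.pyGet? ((PySem.List.pyGet? cell_bounds dim).getD []) idx).getD 0 then
      (dim, sign)
    else
      alt_loop P center cell_bounds rest

def get_dim_sign_alt (P : Int × Int) (center : Int × Int) (cell_bounds : List (List Int)) : Int × Int :=
  alt_loop P center cell_bounds clockwise_ds

-- ===== PRECONDITION & SPEC =====
-- Pre_ restricts to the function's natural domain — exactly two bounds per dimension present
-- (A raises IndexError with fewer than 2 dims; with a 1-element bounds list A's zip silently
-- truncates while B's direct indexing raises, a degenerate shape excluded here) — and requires
-- that some boundary matches (otherwise A raises ValueError, as does B).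
def Pre_get_dim_sign (P : Int × Int) (center : Int × Int) (cell_bounds : List (List Int)) : Prop :=
  2 ≤ cell_bounds.length ∧
  2 ≤ (cell_bounds.getD 0 []).length ∧ 2 ≤ (cell_bounds.getD 1 []).length ∧
  (P.1 = center.1 + (cell_bounds.getD 0 []).getD 0 0 ∨
   P.1 = center.1 + (cell_bounds.getD 0 []).getD 1 0 ∨
   P.2 = center.2 + (cell_bounds.getD 1 []).getD 0 0 ∨
   P.2 = center.2 + (cell_bounds.getD 1 []).getD 1 0)
instance (P : Int × Int) (center : Int × Int) (cell_bounds : List (List Int)) : Decidable (Pre_get_dim_sign P center cell_bounds) := by unfold Pre_get_dim_sign; infer_instance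

def pvWitness_get_dim_sign : (Int × Int) × (Int × Int) × List (List Int) :=
  ((3, 0), (2, 0), [[-1, 1], [-1, 1]])

def Spec_get_dim_sign (P : Int × Int) (center : Int × Int) (cell_bounds : List (List Int)) (out : Int × Int) : Prop := out = get_dim_sign_alt P center cell_bounds
instance (P : Int × Int) (center : Int × Int) (cell_bounds : List (List Int)) (out : Int × Int) : Decidable (Spec_get_dim_sign P center cell_bounds out) := by unfold Spec_get_dim_sign; infer_instance

-- ===== CLAIM (what is proved, stated in full; the proofs are below) =====
def Claim_equal_get_dim_sign : Prop := ∀ (P : Int × Int) (center : Int × Int) (cell_bounds : List (List Int)), Dom_get_dim_sign P center cell_bounds → Pre_get_dim_sign P center cell_bounds → Spec_get_dim_sign P center cell_bounds (get_dim_sign P center cell_bounds)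

-- ===== LEMMAS AND PROOFS =====
theorem pyGet2_zero {α : Type} (a b : α) (l : List α) : PySem.List.pyGet? (a::b::l) (0:Int) = some a := by
  have h : (0:Int) ≤ (l.length:Int) + 1 := by positivity
  simp [PySem.List.pyGet?, PySem.List.pyIdx?, h]

theorem pyGet2_one {α : Type} (a b : α) (l : List α) : PySem.List.pyGet? (a::b::l) (1:Int) = some b := by
  simp [PySem.List.pyGet?, PySem.List.pyIdx?]

set_option maxHeartbeats 1000000 in
theorem get_dim_sign_eq_alt (P : Int × Int) (center : Int × Int)
    (cell_bounds : List (List Int)) (hpre : Pre_get_dim_sign P center cell_bounds) :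
    get_dim_sign P center cell_bounds = get_dim_sign_alt P center cell_bounds := by
  obtain ⟨hl, h0, h1, hm⟩ := hpre
  obtain ⟨b0, b1, rest, rfl⟩ : ∃ b0 b1 rest, cell_bounds = b0 :: b1 :: rest := by
    match cell_bounds, hl with
    | b0 :: b1 :: rest, _ => exact ⟨b0, b1, rest, rfl⟩
  obtain ⟨x0, x1, xr, rfl⟩ : ∃ x0 x1 xr, b0 = x0 :: x1 :: xr := by
    match b0, h0 with
    | x0 :: x1 :: xr, _ => exact ⟨x0, x1, xr, rfl⟩
  obtain ⟨y0, y1, yr, rfl⟩ : ∃ y0 y1 yr, b1 = y0 :: y1 :: yr := by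
    match b1, h1 with
    | y0 :: y1 :: yr, _ => exact ⟨y0, y1, yr, rfl⟩
  simp only [List.getD_cons_zero, List.getD_cons_succ] at hm
  have hR : PySem.List.pyRange 0 2 1 = [(0:Int), 1] := by decide
  simp only [get_dim_sign, get_dim_sign_alt, alt_loop, clockwise_ds, pairGet, hR,
    pyGet2_zero, pyGet2_one, Option.getD_some, List.foldl_cons, List.foldl_nil,
    List.zip_cons_cons, List.zip_nil_left]
  norm_num
  by_cases h00 : P.1 = center.1 + x0 <;>
  by_cases h01 : P.1 = center.1 + x1 <;>
  by_cases h10 : P.2 = center.2 + y0 <;>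
  by_cases h11 : P.2 = center.2 + y1 <;>
  simp_all

-- ===== VERDICT (by name: the statement is the Claim_ definition above) =====
theorem get_dim_sign_spec : Claim_equal_get_dim_sign := by
  intro P center cell_bounds _ hpre
  unfold Spec_get_dim_sign
  exact get_dim_sign_eq_alt P center cell_bounds hpre
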